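-- pv_equiv track=rewrite | github.com/ConceptJunkie/primes | primeDataUtils.py | generateDecodeArray
-- ===== SOURCE A (Python) =====
-- primeNumbers = [ 2, 3, 5, 7, 11, 13, 17, 19, 23, 29, 31, 37, 41, 43, 47, 53 ]
--
-- def getPrimorial( index ):
--     result = 1
--
--     for i in range( index ):
--         result *= primeNumbers[ i ]
--
--     return result
--
-- def isRough( n, k ):
--     for prime in primeNumbers:
--         if prime >= k:
--             return True
--
--         if n % prime == 0:
--             return False
--
-- def generateDecodeArray( index ):
--     result = [ ]
--
--     size = getPrimorial( index )
--     base = primeNumbers[ index ] - 1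
--
--     for i in range( size ):
--         if isRough( i + base, primeNumbers[ index ] ):
--             result.append( i )
--
--     return result
-- ===== SOURCE B (Python) =====
-- primeNumbers = [ 2, 3, 5, 7, 11, 13, 17, 19, 23, 29, 31, 37, 41, 43, 47, 53 ]
--
-- def generateDecodeArray(index):
--     size = 1
--     for i in range(index):
--         size *= primeNumbers[i]
--     k = primeNumbers[index]
--     base = k - 1
--     marked = bytearray(size)
--     for p in primeNumbers:
--         if p >= k:
--             break
--         start = (-base) % p
--         marked[start::p] = b'\x01' * len(range(start, size, p))
--     return [i for i in range(size) if not marked[i]]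
-- ===== Notes on version B (the rewrite author's own statement) =====
-- stated objective: faster
-- what changed: Replaces per-element trial division (isRough over the prime list for every i) by a sieve: for each prime below primeNumbers[index] mark its residue class in a byte array via one C-level slice assignment, then collect the unmarked offsets.
import Mathlib
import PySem

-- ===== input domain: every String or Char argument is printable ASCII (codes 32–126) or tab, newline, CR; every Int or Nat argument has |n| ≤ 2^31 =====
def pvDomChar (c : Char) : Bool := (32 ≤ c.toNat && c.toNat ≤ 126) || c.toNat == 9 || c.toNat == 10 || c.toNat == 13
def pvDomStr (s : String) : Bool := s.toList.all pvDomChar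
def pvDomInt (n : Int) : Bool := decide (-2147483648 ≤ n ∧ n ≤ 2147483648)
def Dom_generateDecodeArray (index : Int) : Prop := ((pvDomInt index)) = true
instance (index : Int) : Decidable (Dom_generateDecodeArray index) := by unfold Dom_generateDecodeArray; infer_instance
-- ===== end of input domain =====

-- B replaces A's per-element trial division by a residue-class marking sieve (marking done by slice
-- assignment); equivalence is claimed on every index where A returns (no IndexError).

-- ===== PORT A =====
def primeNumbersA : List Int := [2, 3, 5, 7, 11, 13, 17, 19, 23, 29, 31, 37, 41, 43, 47, 53]

def getPrimorial (index : Int) : Int :=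
  (PySem.List.pyRange 0 index 1).foldl
    (fun result i => result * PySem.List.pyGetD primeNumbersA i 0) 1

-- the `for prime in primeNumbers` loop of isRough; `[]` yields Python's implicit `return None`,
-- which A's `if` treats as false
def isRoughLoop (n k : Int) : List Int → Bool
  | [] => false
  | p :: ps =>
    if p ≥ k then true
    else if PySem.Int.mod n p == 0 then false
    else isRoughLoop n k ps

def isRough (n k : Int) : Bool := isRoughLoop n k primeNumbersA

def generateDecodeArray (index : Int) : List Int :=
  let size := getPrimorial index
  let base := PySem.List.pyGetD primeNumbersA index 0 - 1
  (PySem.List.pyRange 0 size 1).foldl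
    (fun result i =>
      if isRough (i + base) (PySem.List.pyGetD primeNumbersA index 0) then result ++ [i]
      else result) []

-- ===== PORT B =====
-- the `for p in primeNumbers: if p >= k: break; …` sieve loop of Source B; the slice assignment
-- `marked[start::p] = b'\x01' * len(range(start, size, p))` is ported index by index (exact: the
-- assigned bytes have exactly the slice's length, so it sets each position of range(start,size,p) to 1)
def markLoop (size base k : Int) : List Int → List Bool → List Bool
  | [], marked => marked
  | p :: ps, marked =>
    if p ≥ k then marked
    else markLoop size base k ps
      ((PySem.List.pyRange (PySem.Int.mod (-base) p) size p).foldl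
        (fun m j => PySem.List.pySetD m j true) marked)

def generateDecodeArray_alt (index : Int) : List Int :=
  let size := (PySem.List.pyRange 0 index 1).foldl
    (fun acc i => acc * PySem.List.pyGetD primeNumbersA i 0) 1
  let k := PySem.List.pyGetD primeNumbersA index 0
  let base := k - 1
  let marked := markLoop size base k primeNumbersA (List.replicate size.toNat false)
  (PySem.List.pyRange 0 size 1).foldl
    (fun result i =>
      if !(PySem.List.pyGetD marked i false) then result ++ [i] else result) []

-- ===== PRECONDITION & SPEC =====
-- Pre_ excludes exactly the indices on which A raises IndexError (primeNumbers[index] out of range,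
-- i.e. index ≥ 16 or index ≤ -17).
def Pre_generateDecodeArray (index : Int) : Prop := -16 ≤ index ∧ index ≤ 15
instance (index : Int) : Decidable (Pre_generateDecodeArray index) := by
  unfold Pre_generateDecodeArray; infer_instance

def pvWitness_generateDecodeArray : Int := 3

def Spec_generateDecodeArray (index : Int) (out : List Int) : Prop := out = generateDecodeArray_alt index
instance (index : Int) (out : List Int) : Decidable (Spec_generateDecodeArray index out) := by unfold Spec_generateDecodeArray; infer_instance

-- ===== CLAIM (what is proved, stated in full; the proofs are below) =====
def Claim_equal_generateDecodeArray : Prop := ∀ (index : Int), Dom_generateDecodeArray index → Pre_generateDecodeArray index → Spec_generateDecodeArray index (generateDecodeArray index)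

-- ===== LEMMAS AND PROOFS =====

-- length is preserved by the marking fold
lemma foldl_pySetD_length (l : List Int) (m : List Bool) :
    (l.foldl (fun m j => PySem.List.pySetD m j true) m).length = m.length := by
  induction l generalizing m with
  | nil => rfl
  | cons j l ih => simp [List.foldl_cons, ih, PySem.List.length_pySetD]

-- marking a list of (nonnegative) positions sets exactly those positions
lemma foldl_pySetD_getD (l : List Int) (m : List Bool) (i : Int)
    (hl : ∀ j ∈ l, 0 ≤ j) (hi0 : 0 ≤ i) (hi1 : i < m.length) :
    PySem.List.pyGetD (l.foldl (fun m j => PySem.List.pySetD m j true) m) i false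
      = (decide (i ∈ l) || PySem.List.pyGetD m i false) := by
  induction l generalizing m with
  | nil => simp
  | cons j l ih =>
    have hj : 0 ≤ j := hl j (by simp)
    have hlen : (PySem.List.pySetD m j true).length = m.length := PySem.List.length_pySetD m j true
    rw [List.foldl_cons,
      ih (PySem.List.pySetD m j true) (fun x hx => hl x (List.mem_cons_of_mem _ hx))
        (by rw [hlen]; exact_mod_cast hi1)]
    have hset : PySem.List.pyGetD (PySem.List.pySetD m j true) i false
        = if i = j then true else PySem.List.pyGetD m i false := by
      rw [PySem.List.pySetD_of_nonneg m true hj,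
        PySem.List.pyGetD_eq_getElem _ _ hi0 (by simpa using hi1),
        List.getElem_set]
      by_cases h : i = j
      · simp [h]
      · have : ¬ j.toNat = i.toNat := fun hh => h (by omega)
        rw [if_neg this, PySem.List.pyGetD_eq_getElem _ _ hi0 hi1, if_neg h]
    rw [hset]
    by_cases h : i = j <;> by_cases h2 : i ∈ l <;> simp [h, h2]

-- markLoop marks position i iff some prime below the cutoff divides i + base
lemma markLoop_getD (size base k : Int) (qs : List Int) (r : Int) (rs : List Int)
    (m : List Bool) (i : Int)
    (hq : ∀ q ∈ qs, 0 < q ∧ q < k) (hr : k ≤ r) (hi0 : 0 ≤ i) (hi1 : i < size)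
    (hlen : i < m.length) :
    PySem.List.pyGetD (markLoop size base k (qs ++ r :: rs) m) i false
      = (decide (∃ q ∈ qs, q ∣ i + base) || PySem.List.pyGetD m i false) := by
  induction qs generalizing m with
  | nil => simp [markLoop, hr]
  | cons q qs ih =>
    obtain ⟨hq0, hqk⟩ := hq q (by simp)
    have hnot : ¬ q ≥ k := by omega
    simp only [List.cons_append, markLoop, if_neg hnot]
    set start := PySem.Int.mod (-base) q with hstart
    have hs0 : 0 ≤ start := PySem.Int.mod_nonneg _ hq0
    have hsq : start < q := PySem.Int.mod_lt _ hq0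
    have hfd := PySem.Int.floordiv_mul_add_mod (-base) q
    obtain ⟨d, hd⟩ : q ∣ start + base :=
      ⟨-(PySem.Int.floordiv (-base) q), by linear_combination hfd⟩
    have hm' := foldl_pySetD_length (PySem.List.pyRange start size q) m
    have hjpos : ∀ j ∈ PySem.List.pyRange start size q, 0 ≤ j := by
      intro j hj
      rcases (PySem.List.mem_pyRange_iff_of_pos hq0 j).1 hj with ⟨h1, _, _⟩
      omega
    rw [ih _ (fun x hx => hq x (List.mem_cons_of_mem _ hx)) (by rw [hm']; exact_mod_cast hlen),
      foldl_pySetD_getD _ m i hjpos hi0 hlen]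
    have hmem : (i ∈ PySem.List.pyRange start size q) ↔ q ∣ i + base := by
      rw [PySem.List.mem_pyRange_iff_of_pos hq0 i]
      constructor
      · rintro ⟨h1, h2, c, hc⟩
        exact ⟨c + d, by linear_combination hc + hd⟩
      · rintro ⟨e, he⟩
        have hdvd2 : q ∣ i - start := ⟨e - d, by linear_combination he - hd⟩
        have hle : start ≤ i := by
          by_contra hlt
          have : i - start = 0 := Int.eq_zero_of_abs_lt_dvd hdvd2 (by rw [abs_lt]; omega)
          omega
        exact ⟨hle, hi1, hdvd2⟩
    by_cases h1 : q ∣ i + base <;> by_cases h2 : ∃ x ∈ qs, x ∣ i + base <;>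
      simp [h1, h2, hmem]

-- the isRough scan over the split prime list is the all-primes-below-k divisibility test
lemma isRoughLoop_eq (n k : Int) (qs : List Int) (r : Int) (rs : List Int)
    (hq : ∀ q ∈ qs, q < k) (hr : k ≤ r) :
    isRoughLoop n k (qs ++ r :: rs) = decide (∀ q ∈ qs, ¬ q ∣ n) := by
  induction qs with
  | nil => simp [isRoughLoop, hr]
  | cons q qs ih =>
    have hqk : q < k := hq q (by simp)
    simp only [List.cons_append, isRoughLoop, if_neg (by omega : ¬ q ≥ k)]
    by_cases hdvd : q ∣ n
    · simp [(PySem.Int.mod_eq_zero_iff_dvd n q).2 hdvd, hdvd]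
    · have hmod : ¬ (PySem.Int.mod n q == 0) = true := by
        simp [PySem.Int.mod_eq_zero_iff_dvd, hdvd]
      rw [if_neg hmod, ih (fun x hx => hq x (List.mem_cons_of_mem _ hx))]
      simp [hdvd]

-- one instantiation of the equivalence, parameterised by the concrete split of the prime list
lemma gen_eq (index : Int) (qs : List Int) (r : Int) (rs : List Int) (k P : Int)
    (hsplit : qs ++ r :: rs = primeNumbersA)
    (hq : ∀ q ∈ qs, 0 < q ∧ q < k) (hr : k ≤ r) (hP : 0 ≤ P)
    (hk : PySem.List.pyGetD primeNumbersA index 0 = k)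
    (hA : getPrimorial index = P)
    (hB : (PySem.List.pyRange 0 index 1).foldl
      (fun acc i => acc * PySem.List.pyGetD primeNumbersA i 0) 1 = P) :
    generateDecodeArray index = generateDecodeArray_alt index := by
  simp only [generateDecodeArray, generateDecodeArray_alt]
  rw [hA, hB, hk]
  apply PySem.List.foldl_congr_mem
  intro acc i hi
  rw [PySem.List.mem_pyRange_one] at hi
  obtain ⟨hi0, hi1⟩ := hi
  have hlenrep : ((List.replicate P.toNat false).length : Int) = P := by
    simp [List.length_replicate]; omega
  have hrep0 : PySem.List.pyGetD (List.replicate P.toNat false) i false = false := by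
    rw [PySem.List.pyGetD_eq_getElem _ _ hi0 (by omega), List.getElem_replicate]
  have hcond : isRough (i + (k - 1)) k
      = !(PySem.List.pyGetD
          (markLoop P (k - 1) k primeNumbersA (List.replicate P.toNat false)) i false) := by
    rw [isRough, ← hsplit,
      isRoughLoop_eq _ _ qs r rs (fun x hx => (hq x hx).2) hr,
      markLoop_getD P (k - 1) k qs r rs _ i hq hr hi0 hi1 (by omega), hrep0]
    simp only [Bool.or_false, ← decide_not, decide_eq_decide]
    push Not
    rfl
  rw [hcond]

-- ===== VERDICT (by name: the statement is the Claim_ definition above) =====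
theorem generateDecodeArray_spec : Claim_equal_generateDecodeArray := by
  intro index _ hpre
  obtain ⟨h0, h1⟩ := hpre
  unfold Spec_generateDecodeArray
  interval_cases index
  · exact gen_eq (-16) ([] : List Int) 2 [3, 5, 7, 11, 13, 17, 19, 23, 29, 31, 37, 41, 43, 47, 53] 2 1 (by decide) (by decide) (by decide) (by decide) (by decide) (by decide) (by decide)
  · exact gen_eq (-15) [2] 3 [5, 7, 11, 13, 17, 19, 23, 29, 31, 37, 41, 43, 47, 53] 3 1 (by decide) (by decide) (by decide) (by decide) (by decide) (by decide) (by decide)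
  · exact gen_eq (-14) [2, 3] 5 [7, 11, 13, 17, 19, 23, 29, 31, 37, 41, 43, 47, 53] 5 1 (by decide) (by decide) (by decide) (by decide) (by decide) (by decide) (by decide)
  · exact gen_eq (-13) [2, 3, 5] 7 [11, 13, 17, 19, 23, 29, 31, 37, 41, 43, 47, 53] 7 1 (by decide) (by decide) (by decide) (by decide) (by decide) (by decide) (by decide)
  · exact gen_eq (-12) [2, 3, 5, 7] 11 [13, 17, 19, 23, 29, 31, 37, 41, 43, 47, 53] 11 1 (by decide) (by decide) (by decide) (by decide) (by decide) (by decide) (by decide)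
  · exact gen_eq (-11) [2, 3, 5, 7, 11] 13 [17, 19, 23, 29, 31, 37, 41, 43, 47, 53] 13 1 (by decide) (by decide) (by decide) (by decide) (by decide) (by decide) (by decide)
  · exact gen_eq (-10) [2, 3, 5, 7, 11, 13] 17 [19, 23, 29, 31, 37, 41, 43, 47, 53] 17 1 (by decide) (by decide) (by decide) (by decide) (by decide) (by decide) (by decide)
  · exact gen_eq (-9) [2, 3, 5, 7, 11, 13, 17] 19 [23, 29, 31, 37, 41, 43, 47, 53] 19 1 (by decide) (by decide) (by decide) (by decide) (by decide) (by decide) (by decide)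
  · exact gen_eq (-8) [2, 3, 5, 7, 11, 13, 17, 19] 23 [29, 31, 37, 41, 43, 47, 53] 23 1 (by decide) (by decide) (by decide) (by decide) (by decide) (by decide) (by decide)
  · exact gen_eq (-7) [2, 3, 5, 7, 11, 13, 17, 19, 23] 29 [31, 37, 41, 43, 47, 53] 29 1 (by decide) (by decide) (by decide) (by decide) (by decide) (by decide) (by decide)
  · exact gen_eq (-6) [2, 3, 5, 7, 11, 13, 17, 19, 23, 29] 31 [37, 41, 43, 47, 53] 31 1 (by decide) (by decide) (by decide) (by decide) (by decide) (by decide) (by decide)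
  · exact gen_eq (-5) [2, 3, 5, 7, 11, 13, 17, 19, 23, 29, 31] 37 [41, 43, 47, 53] 37 1 (by decide) (by decide) (by decide) (by decide) (by decide) (by decide) (by decide)
  · exact gen_eq (-4) [2, 3, 5, 7, 11, 13, 17, 19, 23, 29, 31, 37] 41 [43, 47, 53] 41 1 (by decide) (by decide) (by decide) (by decide) (by decide) (by decide) (by decide)
  · exact gen_eq (-3) [2, 3, 5, 7, 11, 13, 17, 19, 23, 29, 31, 37, 41] 43 [47, 53] 43 1 (by decide) (by decide) (by decide) (by decide) (by decide) (by decide) (by decide)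
  · exact gen_eq (-2) [2, 3, 5, 7, 11, 13, 17, 19, 23, 29, 31, 37, 41, 43] 47 [53] 47 1 (by decide) (by decide) (by decide) (by decide) (by decide) (by decide) (by decide)
  · exact gen_eq (-1) [2, 3, 5, 7, 11, 13, 17, 19, 23, 29, 31, 37, 41, 43, 47] 53 ([] : List Int) 53 1 (by decide) (by decide) (by decide) (by decide) (by decide) (by decide) (by decide)
  · exact gen_eq (0) ([] : List Int) 2 [3, 5, 7, 11, 13, 17, 19, 23, 29, 31, 37, 41, 43, 47, 53] 2 1 (by decide) (by decide) (by decide) (by decide) (by decide) (by decide) (by decide)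
  · exact gen_eq (1) [2] 3 [5, 7, 11, 13, 17, 19, 23, 29, 31, 37, 41, 43, 47, 53] 3 2 (by decide) (by decide) (by decide) (by decide) (by decide) (by decide) (by decide)
  · exact gen_eq (2) [2, 3] 5 [7, 11, 13, 17, 19, 23, 29, 31, 37, 41, 43, 47, 53] 5 6 (by decide) (by decide) (by decide) (by decide) (by decide) (by decide) (by decide)
  · exact gen_eq (3) [2, 3, 5] 7 [11, 13, 17, 19, 23, 29, 31, 37, 41, 43, 47, 53] 7 30 (by decide) (by decide) (by decide) (by decide) (by decide) (by decide) (by decide)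
  · exact gen_eq (4) [2, 3, 5, 7] 11 [13, 17, 19, 23, 29, 31, 37, 41, 43, 47, 53] 11 210 (by decide) (by decide) (by decide) (by decide) (by decide) (by decide) (by decide)
  · exact gen_eq (5) [2, 3, 5, 7, 11] 13 [17, 19, 23, 29, 31, 37, 41, 43, 47, 53] 13 2310 (by decide) (by decide) (by decide) (by decide) (by decide) (by decide) (by decide)
  · exact gen_eq (6) [2, 3, 5, 7, 11, 13] 17 [19, 23, 29, 31, 37, 41, 43, 47, 53] 17 30030 (by decide) (by decide) (by decide) (by decide) (by decide) (by decide) (by decide)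
  · exact gen_eq (7) [2, 3, 5, 7, 11, 13, 17] 19 [23, 29, 31, 37, 41, 43, 47, 53] 19 510510 (by decide) (by decide) (by decide) (by decide) (by decide) (by decide) (by decide)
  · exact gen_eq (8) [2, 3, 5, 7, 11, 13, 17, 19] 23 [29, 31, 37, 41, 43, 47, 53] 23 9699690 (by decide) (by decide) (by decide) (by decide) (by decide) (by decide) (by decide)
  · exact gen_eq (9) [2, 3, 5, 7, 11, 13, 17, 19, 23] 29 [31, 37, 41, 43, 47, 53] 29 223092870 (by decide) (by decide) (by decide) (by decide) (by decide) (by decide) (by decide)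
  · exact gen_eq (10) [2, 3, 5, 7, 11, 13, 17, 19, 23, 29] 31 [37, 41, 43, 47, 53] 31 6469693230 (by decide) (by decide) (by decide) (by decide) (by decide) (by decide) (by decide)
  · exact gen_eq (11) [2, 3, 5, 7, 11, 13, 17, 19, 23, 29, 31] 37 [41, 43, 47, 53] 37 200560490130 (by decide) (by decide) (by decide) (by decide) (by decide) (by decide) (by decide)
  · exact gen_eq (12) [2, 3, 5, 7, 11, 13, 17, 19, 23, 29, 31, 37] 41 [43, 47, 53] 41 7420738134810 (by decide) (by decide) (by decide) (by decide) (by decide) (by decide) (by decide)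
  · exact gen_eq (13) [2, 3, 5, 7, 11, 13, 17, 19, 23, 29, 31, 37, 41] 43 [47, 53] 43 304250263527210 (by decide) (by decide) (by decide) (by decide) (by decide) (by decide) (by decide)
  · exact gen_eq (14) [2, 3, 5, 7, 11, 13, 17, 19, 23, 29, 31, 37, 41, 43] 47 [53] 47 13082761331670030 (by decide) (by decide) (by decide) (by decide) (by decide) (by decide) (by decide)
  · exact gen_eq (15) [2, 3, 5, 7, 11, 13, 17, 19, 23, 29, 31, 37, 41, 43, 47] 53 ([] : List Int) 53 614889782588491410 (by decide) (by decide) (by decide) (by decide) (by decide) (by decide) (by decide)
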